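-- pv_equiv track=rewrite | github.com/veenatrivedi15/BE-DS-Project-2025-26 | Group_07_VISTA/Source_Code/meta_controller.py | _check_emergency_conflict
-- ===== SOURCE A (Python) =====
-- def _check_emergency_conflict(current_phase_dirs, emergency_dirs):
--     """Check if current phase conflicts with emergency vehicle directions"""
--     conflicts = {
--         'North': ['East', 'West'],
--         'South': ['East', 'West'],
--         'East': ['North', 'South'],
--         'West': ['North', 'South']
--     }
--
--     for current_dir in current_phase_dirs:
--         for emergency_dir in emergency_dirs:
--             if emergency_dir in conflicts.get(current_dir, []):
--                 return True
--     return False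
-- ===== SOURCE B (Python) =====
-- def _check_emergency_conflict(current_phase_dirs, emergency_dirs):
--     """Check if current phase conflicts with emergency vehicle directions.
--
--     Closed-form perpendicular-axis rule: North/South conflict exactly with
--     East/West, so a conflict exists iff the two direction sets touch
--     opposite axes."""
--     NS = {'North', 'South'}
--     EW = {'East', 'West'}
--     cur = set(current_phase_dirs)
--     emg = set(emergency_dirs)
--     return bool((cur & NS and emg & EW) or (cur & EW and emg & NS))
-- ===== Notes on version B (the rewrite author's own statement) =====
-- stated objective: simpler
-- what changed: Replaces the nested double loop with dict lookups by a closed-form perpendicular-axis test: intersect each argument (as a set) with the fixed NS/EW axis sets and combine four emptiness checks.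
import Mathlib
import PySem

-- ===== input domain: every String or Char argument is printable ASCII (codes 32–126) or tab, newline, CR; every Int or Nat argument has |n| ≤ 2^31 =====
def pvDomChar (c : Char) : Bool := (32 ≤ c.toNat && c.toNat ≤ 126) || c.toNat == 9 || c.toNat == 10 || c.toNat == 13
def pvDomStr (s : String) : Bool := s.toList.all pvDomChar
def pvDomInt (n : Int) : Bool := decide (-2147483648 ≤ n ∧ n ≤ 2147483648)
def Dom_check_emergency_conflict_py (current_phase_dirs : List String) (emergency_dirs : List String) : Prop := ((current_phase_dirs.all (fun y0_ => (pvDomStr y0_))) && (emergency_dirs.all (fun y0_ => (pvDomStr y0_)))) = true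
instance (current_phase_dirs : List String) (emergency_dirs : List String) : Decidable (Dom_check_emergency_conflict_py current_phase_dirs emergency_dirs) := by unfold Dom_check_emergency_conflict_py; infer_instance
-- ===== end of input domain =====

-- B replaces A's nested pair loop + conflict dict by a closed-form perpendicular-axis set test (simpler).


-- ===== PORT A =====
-- conflicts dict of A, built once
def pvConflicts : PySem.Dict String (List String) :=
  PySem.Dict.ofList [("North", ["East", "West"]), ("South", ["East", "West"]),
                     ("East", ["North", "South"]), ("West", ["North", "South"])]

-- nested for-loops with early 'return True' = nested any over the same lists
def check_emergency_conflict_py (current_phase_dirs : List String) (emergency_dirs : List String) : Bool :=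
  current_phase_dirs.any (fun current_dir =>
    emergency_dirs.any (fun emergency_dir =>
      (PySem.Dict.getD pvConflicts current_dir []).contains emergency_dir))

-- ===== PORT B =====
-- B: closed-form perpendicular-axis test (no loop over pairs)
def check_emergency_conflict_py_alt (current_phase_dirs : List String) (emergency_dirs : List String) : Bool :=
  let ns : PySem.Set String := PySem.Set.ofList ["North", "South"]
  let ew : PySem.Set String := PySem.Set.ofList ["East", "West"]
  let cur : PySem.Set String := PySem.Set.ofList current_phase_dirs
  let emg : PySem.Set String := PySem.Set.ofList emergency_dirs
  (!(PySem.Set.inter cur ns).isEmpty && !(PySem.Set.inter emg ew).isEmpty) ||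
  (!(PySem.Set.inter cur ew).isEmpty && !(PySem.Set.inter emg ns).isEmpty)

-- ===== PRECONDITION & SPEC =====
def Spec_check_emergency_conflict_py (current_phase_dirs : List String) (emergency_dirs : List String) (out : Bool) : Prop := out = check_emergency_conflict_py_alt current_phase_dirs emergency_dirs
instance (current_phase_dirs : List String) (emergency_dirs : List String) (out : Bool) : Decidable (Spec_check_emergency_conflict_py current_phase_dirs emergency_dirs out) := by unfold Spec_check_emergency_conflict_py; infer_instance

-- ===== CLAIM (what is proved, stated in full; the proofs are below) =====
def Claim_equal_check_emergency_conflict_py : Prop := ∀ (current_phase_dirs : List String) (emergency_dirs : List String), Dom_check_emergency_conflict_py current_phase_dirs emergency_dirs → Spec_check_emergency_conflict_py current_phase_dirs emergency_dirs (check_emergency_conflict_py current_phase_dirs emergency_dirs)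

-- ===== LEMMAS AND PROOFS =====

-- ===== VERDICT (by name: the statement is the Claim_ definition above) =====
-- pointwise: A's dict lookup & membership equals the axis rule on two arbitrary strings
lemma pv_pointwise (cd ed : String) :
    (PySem.Dict.getD pvConflicts cd []).contains ed = true ↔
      (((cd = "North" ∨ cd = "South") ∧ (ed = "East" ∨ ed = "West")) ∨
       ((cd = "East" ∨ cd = "West") ∧ (ed = "North" ∨ ed = "South"))) := by
  by_cases h1 : cd = "North"
  · subst h1
    rw [show PySem.Dict.getD pvConflicts "North" [] = ["East", "West"] from by decide]
    simp
  by_cases h2 : cd = "South"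
  · subst h2
    rw [show PySem.Dict.getD pvConflicts "South" [] = ["East", "West"] from by decide]
    simp
  by_cases h3 : cd = "East"
  · subst h3
    rw [show PySem.Dict.getD pvConflicts "East" [] = ["North", "South"] from by decide]
    simp
  by_cases h4 : cd = "West"
  · subst h4
    rw [show PySem.Dict.getD pvConflicts "West" [] = ["North", "South"] from by decide]
    simp
  · have hit : pvConflicts.items = [("North", ["East", "West"]), ("South", ["East", "West"]),
        ("East", ["North", "South"]), ("West", ["North", "South"])] := by decide
    have b1 : (("North" : String) == cd) = false := by simp [Ne.symm h1]
    have b2 : (("South" : String) == cd) = false := by simp [Ne.symm h2]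
    have b3 : (("East" : String) == cd) = false := by simp [Ne.symm h3]
    have b4 : (("West" : String) == cd) = false := by simp [Ne.symm h4]
    simp [PySem.Dict.getD, PySem.Dict.get?, hit, List.find?, b1, b2, b3, b4, h1, h2, h3, h4]

lemma pv_inter_nonempty {xs ys : List String} :
    (!(PySem.Set.inter (PySem.Set.ofList xs) ys).isEmpty) = true ↔ ∃ x ∈ xs, x ∈ ys := by
  have h : ∀ x, x ∈ PySem.Set.inter (PySem.Set.ofList xs) ys ↔ x ∈ xs ∧ x ∈ ys := by
    intro x
    rw [PySem.Set.mem_inter, PySem.Set.mem_ofList]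
  constructor
  · intro hne
    cases hI : PySem.Set.inter (PySem.Set.ofList xs) ys with
    | nil => rw [hI] at hne; simp at hne
    | cons a t =>
        have ha := (h a).1 (by rw [hI]; simp)
        exact ⟨a, ha.1, ha.2⟩
  · rintro ⟨x, hx, hy⟩
    have hm := (h x).2 ⟨hx, hy⟩
    cases hI : PySem.Set.inter (PySem.Set.ofList xs) ys with
    | nil => rw [hI] at hm; simp at hm
    | cons a t => simp

theorem check_emergency_conflict_py_spec : Claim_equal_check_emergency_conflict_py := by
  intro c e _
  unfold Spec_check_emergency_conflict_py
  rw [Bool.eq_iff_iff]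
  simp only [check_emergency_conflict_py, check_emergency_conflict_py_alt,
    List.any_eq_true, Bool.or_eq_true, Bool.and_eq_true, pv_inter_nonempty,
    pv_pointwise]
  constructor
  · rintro ⟨cd, hcd, ed, hed, (⟨hc, he⟩ | ⟨hc, he⟩)⟩
    · exact Or.inl ⟨⟨cd, hcd, by simpa [PySem.Set.mem_ofList] using hc⟩,
        ⟨ed, hed, by simpa [PySem.Set.mem_ofList] using he⟩⟩
    · exact Or.inr ⟨⟨cd, hcd, by simpa [PySem.Set.mem_ofList] using hc⟩,
        ⟨ed, hed, by simpa [PySem.Set.mem_ofList] using he⟩⟩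
  · rintro (⟨⟨cd, hcd, hc⟩, ⟨ed, hed, he⟩⟩ | ⟨⟨cd, hcd, hc⟩, ⟨ed, hed, he⟩⟩)
    · exact ⟨cd, hcd, ed, hed, Or.inl ⟨by simpa [PySem.Set.mem_ofList] using hc,
        by simpa [PySem.Set.mem_ofList] using he⟩⟩
    · exact ⟨cd, hcd, ed, hed, Or.inr ⟨by simpa [PySem.Set.mem_ofList] using hc,
        by simpa [PySem.Set.mem_ofList] using he⟩⟩
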